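-- pv_equiv track=rewrite | github.com/gesen2egee/caption-- | lib/utils/__init__.py | smart_parse_tags
-- ===== SOURCE A (Python) =====
-- def smart_parse_tags(text):
--     """
--     Parses text into a list of dictionaries {'text': str, 'trans': str}.
--     """
--     if not text:
--         return []
--
--     clean_text = text.strip()
--     if not clean_text:
--         return []
--
--     parsed_items = []
--     lines = [l.strip() for l in clean_text.split('\n') if l.strip()]
--
--     is_sentence_mode = False
--     if len(lines) > 1:
--         for line in lines:
--             if (line.startswith("(") and line.endswith(")")) or \
--                (line.startswith("（") and line.endswith("）")):
--                 is_sentence_mode = True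
--                 break
--     elif "." in clean_text and "," not in clean_text and len(clean_text) > 50:
--         is_sentence_mode = True
--         lines = [l.strip() for l in clean_text.replace(". ", ".\n").split('\n') if l.strip()]
--
--     if is_sentence_mode:
--         i = 0
--         while i < len(lines):
--             current_line = lines[i]
--             if (current_line.startswith("(") and current_line.endswith(")")) or \
--                (current_line.startswith("（") and current_line.endswith("）")):
--                 i += 1
--                 continue
--
--             trans = None
--             if i + 1 < len(lines):
--                 next_line = lines[i + 1]
--                 if (next_line.startswith("(") and next_line.endswith(")")) or \
--                    (next_line.startswith("（") and next_line.endswith("）")):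
--                     trans = next_line[1:-1].strip()
--                     i += 1
--
--             parsed_items.append({'text': current_line, 'trans': trans})
--             i += 1
--
--     else:
--         segments = clean_text.replace("\n", ",").split(",")
--         for s in segments:
--             if s.strip():
--                 parsed_items.append({'text': s.strip(), 'trans': None})
--
--     return parsed_items
-- ===== SOURCE B (Python) =====
-- def smart_parse_tags(text):
--     """
--     Parses text into a list of dictionaries {'text': str, 'trans': str}.
--     """
--     if not text:
--         return []
--
--     clean_text = text.strip()
--     if not clean_text:
--         return []
--
--     def inner(line):
--         # the bracketed content (stripped) of a parenthesized line, else None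
--         for o, c in (("(", ")"), ("（", "）")):
--             if line.startswith(o) and line.endswith(c):
--                 return line[1:-1].strip()
--         return None
--
--     lines = [l.strip() for l in clean_text.split('\n') if l.strip()]
--
--     if len(lines) > 1:
--         is_sentence_mode = any(inner(l) is not None for l in lines)
--     else:
--         is_sentence_mode = "." in clean_text and "," not in clean_text and len(clean_text) > 50
--         if is_sentence_mode:
--             lines = [l.strip() for l in clean_text.replace(". ", ".\n").split('\n') if l.strip()]
--
--     if not is_sentence_mode:
--         return [{'text': s.strip(), 'trans': None}
--                 for s in clean_text.replace("\n", ",").split(",") if s.strip()]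
--
--     items = []
--     for line in lines:
--         t = inner(line)
--         if t is None:
--             items.append({'text': line, 'trans': None})
--         elif items and items[-1]['trans'] is None:
--             items[-1]['trans'] = t
--     return items
-- ===== Notes on version B (the rewrite author's own statement) =====
-- stated objective: simpler
-- what changed: The index-based while-loop with look-ahead (peek at lines[i+1], manual i skipping) is replaced by a single forward for-loop with a look-back accumulator (a parenthesized line fills the trans of the last open item), the paren test and [1:-1].strip() extraction are factored into one helper used for mode detection too, and the non-sentence branch becomes a comprehension.
import Mathlib
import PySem

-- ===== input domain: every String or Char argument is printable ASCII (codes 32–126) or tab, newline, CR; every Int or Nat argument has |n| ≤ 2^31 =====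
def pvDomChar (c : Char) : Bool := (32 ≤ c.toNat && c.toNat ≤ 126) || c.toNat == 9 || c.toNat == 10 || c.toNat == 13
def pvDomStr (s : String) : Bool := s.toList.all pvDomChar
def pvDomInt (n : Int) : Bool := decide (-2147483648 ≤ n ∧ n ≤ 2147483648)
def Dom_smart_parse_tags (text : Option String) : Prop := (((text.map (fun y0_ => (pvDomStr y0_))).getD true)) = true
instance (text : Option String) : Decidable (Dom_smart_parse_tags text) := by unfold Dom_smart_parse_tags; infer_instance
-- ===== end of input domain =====

-- B replaces A's index-based look-ahead while-loop by a forward pass with a look-back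
-- accumulator and factors the parenthesis test into one helper (objective: simpler).
-- Dicts {'text':…,'trans':…} are ported as assoc lists; the lookups items[-1]['trans']
-- and the in-place overwrite are ported by hand on the assoc list (exact: keys unique).

-- ===== PORT A =====
-- A's repeated parenthesized-line test, verbatim
def pvIsParenA (line : String) : Bool :=
  (PySem.Str.startswith line "(" && PySem.Str.endswith line ")") ||
  (PySem.Str.startswith line "（" && PySem.Str.endswith line "）")

-- A's sentence-mode while-loop over index i: structural recursion consuming one line,
-- or two when the next line is parenthesized (trans = next_line[1:-1].strip())
def pvLoopA (lines : List String) : List (List (String × Option String)) :=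
  match lines with
  | [] => []
  | [l] =>
    if pvIsParenA l then [] else [[("text", some l), ("trans", (none : Option String))]]
  | l :: n :: rest2 =>
    if pvIsParenA l then pvLoopA (n :: rest2)
    else if pvIsParenA n then
      [("text", some l), ("trans", some (PySem.Str.strip (PySem.Str.slice n (some 1) (some (-1)))))]
        :: pvLoopA rest2
    else
      [("text", some l), ("trans", (none : Option String))] :: pvLoopA (n :: rest2)
termination_by lines.length
decreasing_by all_goals (simp only [List.length_cons]; omega)

def smart_parse_tags (text : Option String) : List (List (String × Option String)) :=
  match text with
  | none => []
  | some t =>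
    if t = "" then []  -- `if not text` is true for None and ""
    else
      let clean_text := PySem.Str.strip t
      if clean_text = "" then []
      else
        -- [l.strip() for l in clean_text.split('\n') if l.strip()]
        let lines0 := (((PySem.Str.split? clean_text "\n").getD []).map PySem.Str.strip).filter (· != "")
        -- (is_sentence_mode, lines) after the mode-detection block; the for-break is `any`
        let pr : Bool × List String :=
          if lines0.length > 1 then
            (lines0.any pvIsParenA, lines0)
          else if PySem.Str.isIn "." clean_text && !PySem.Str.isIn "," clean_text
                  && decide (PySem.Str.len clean_text > 50) then
            (true, (((PySem.Str.split? (PySem.Str.replace clean_text ". " ".\n") "\n").getD []).map PySem.Str.strip).filter (· != ""))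
          else
            (false, lines0)
        if pr.1 then
          pvLoopA pr.2
        else
          let segments := (PySem.Str.split? (PySem.Str.replace clean_text "\n" ",") ",").getD []
          segments.foldl
            (fun acc s =>
              if PySem.Str.strip s != "" then
                acc ++ [[("text", some (PySem.Str.strip s)), ("trans", (none : Option String))]]
              else acc)
            []

-- ===== PORT B =====
-- Source B's `inner`: the bracketed content (stripped) of a parenthesized line, else None
def pvInnerB (line : String) : Option String :=
  match [("(", ")"), ("（", "）")].find?
          (fun p => PySem.Str.startswith line p.1 && PySem.Str.endswith line p.2) with
  | some _ => some (PySem.Str.strip (PySem.Str.slice line (some 1) (some (-1))))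
  | none => none

-- Source B's loop body: look-back step (items[-1]['trans'] read and in-place overwrite
-- ported by hand on the assoc list — exact, the keys are unique)
def pvStepB (acc : List (List (String × Option String))) (line : String) :
    List (List (String × Option String)) :=
  match pvInnerB line with
  | none => acc ++ [[("text", some line), ("trans", (none : Option String))]]
  | some tr =>
    match acc.getLast? with
    | none => acc
    | some item =>
      if item.lookup "trans" = some none then
        acc.dropLast ++ [item.map (fun kv => if kv.1 == "trans" then (kv.1, some tr) else kv)]
      else acc

def smart_parse_tags_alt (text : Option String) : List (List (String × Option String)) :=
  match text with
  | none => []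
  | some t =>
    if t = "" then []
    else
      let clean_text := PySem.Str.strip t
      if clean_text = "" then []
      else
        let lines0 := (((PySem.Str.split? clean_text "\n").getD []).map PySem.Str.strip).filter (· != "")
        let st : Bool × List String :=
          if lines0.length > 1 then
            (lines0.any (fun l => (pvInnerB l).isSome), lines0)
          else
            let m := PySem.Str.isIn "." clean_text && !PySem.Str.isIn "," clean_text
                       && decide (PySem.Str.len clean_text > 50)
            (m, if m then (((PySem.Str.split? (PySem.Str.replace clean_text ". " ".\n") "\n").getD []).map PySem.Str.strip).filter (· != "") else lines0)
        if !st.1 then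
          -- the non-sentence comprehension
          (((PySem.Str.split? (PySem.Str.replace clean_text "\n" ",") ",").getD []).filter
              (fun s => PySem.Str.strip s != "")).map
            (fun s => [("text", some (PySem.Str.strip s)), ("trans", (none : Option String))])
        else
          st.2.foldl pvStepB []

-- ===== PRECONDITION & SPEC =====
def Spec_smart_parse_tags (text : Option String) (out : List (List (String × Option String))) : Prop := out = smart_parse_tags_alt text
instance (text : Option String) (out : List (List (String × Option String))) : Decidable (Spec_smart_parse_tags text out) := by unfold Spec_smart_parse_tags; infer_instance

-- ===== CLAIM (what is proved, stated in full; the proofs are below) =====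
def Claim_equal_smart_parse_tags : Prop := ∀ (text : Option String), Dom_smart_parse_tags text → Spec_smart_parse_tags text (smart_parse_tags text)

-- ===== LEMMAS AND PROOFS =====

-- Source B's `inner` agrees with A's parenthesis test
lemma pvInnerB_eq (l : String) :
    pvInnerB l = if pvIsParenA l
                 then some (PySem.Str.strip (PySem.Str.slice l (some 1) (some (-1))))
                 else none := by
  unfold pvInnerB pvIsParenA
  cases h1 : PySem.Str.startswith l "(" && PySem.Str.endswith l ")" <;>
    cases h2 : PySem.Str.startswith l "（" && PySem.Str.endswith l "）" <;>
      simp only [List.find?, h1, h2] <;> simp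

lemma pvInnerB_isSome (l : String) : (pvInnerB l).isSome = pvIsParenA l := by
  rw [pvInnerB_eq]; cases pvIsParenA l <;> simp

-- the look-back fold equals A's look-ahead recursion, given that the accumulator's last
-- item (if any) is already closed, or the first line is not parenthesized
lemma pvFoldB_eq (fuel : Nat) : ∀ (lines : List String), lines.length ≤ fuel →
    ∀ (acc : List (List (String × Option String))),
      ((∀ it, acc.getLast? = some it → it.lookup "trans" ≠ some none) ∨
        (∃ l rest, lines = l :: rest ∧ pvIsParenA l = false)) →
      lines.foldl pvStepB acc = acc ++ pvLoopA lines := by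
  induction fuel with
  | zero =>
    intro lines hlen acc _
    have : lines = [] := List.eq_nil_of_length_eq_zero (Nat.le_zero.mp hlen)
    subst this; simp [pvLoopA]
  | succ fuel ih =>
    intro lines hlen acc h
    match lines with
    | [] => simp [pvLoopA]
    | l :: rest =>
      cases hP : pvIsParenA l with
      | true =>
        -- the head is parenthesized: A skips it; B's step leaves acc unchanged
        have hcl : ∀ it, acc.getLast? = some it → it.lookup "trans" ≠ some none := by
          rcases h with h | ⟨l', rest', heq, hP'⟩
          · exact h
          · cases heq; rw [hP] at hP'; cases hP'
        have hstep : pvStepB acc l = acc := by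
          unfold pvStepB
          rw [pvInnerB_eq, hP]
          cases hL : acc.getLast? with
          | none => simp
          | some it => simp [hcl it hL]
        rw [List.foldl_cons, hstep,
            ih rest (by simpa using Nat.le_of_succ_le_succ hlen) acc (Or.inl hcl)]
        cases rest <;> simp [pvLoopA, hP]
      | false =>
        -- the head is plain text: B appends an open item
        have hstep : pvStepB acc l
            = acc ++ [[("text", some l), ("trans", (none : Option String))]] := by
          unfold pvStepB; rw [pvInnerB_eq, hP]; simp
        match rest with
        | [] =>
          rw [List.foldl_cons, hstep]; simp [pvLoopA, hP]
        | n :: rest2 =>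
          cases hPn : pvIsParenA n with
          | true =>
            -- the next line is parenthesized: it closes the freshly appended item
            have hstep2 : pvStepB (acc ++ [[("text", some l), ("trans", (none : Option String))]]) n
                = acc ++ [[("text", some l),
                           ("trans", some (PySem.Str.strip (PySem.Str.slice n (some 1) (some (-1)))))]] := by
              unfold pvStepB
              rw [pvInnerB_eq, hPn, List.getLast?_concat]
              simp [List.lookup]
            rw [List.foldl_cons, hstep, List.foldl_cons, hstep2,
                ih rest2 (by simp at hlen; omega)
                  (acc ++ [[("text", some l),
                            ("trans", some (PySem.Str.strip (PySem.Str.slice n (some 1) (some (-1)))))]])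
                  (Or.inl (by intro it hL; rw [List.getLast?_concat] at hL; cases hL; simp [List.lookup]))]
            simp [pvLoopA, hP, hPn]
          | false =>
            -- next line is plain too: the open item is final, recurse with the look-back guard
            rw [List.foldl_cons, hstep,
                ih (n :: rest2) (by simpa using Nat.le_of_succ_le_succ hlen)
                  (acc ++ [[("text", some l), ("trans", (none : Option String))]])
                  (Or.inr ⟨n, rest2, rfl, hPn⟩)]
            simp [pvLoopA, hP, hPn]

lemma pvSentence_eq (lines : List String) :
    lines.foldl pvStepB [] = pvLoopA lines := by
  simpa using pvFoldB_eq lines.length lines le_rfl [] (Or.inl (by intro it h; simp at h))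

-- ===== VERDICT (by name: the statement is the Claim_ definition above) =====
theorem smart_parse_tags_spec : Claim_equal_smart_parse_tags := by
  intro text _
  unfold Spec_smart_parse_tags smart_parse_tags smart_parse_tags_alt
  match text with
  | none => rfl
  | some t =>
    by_cases ht : t = ""
    · simp [ht]
    · simp only [ht, if_false]
      by_cases hc : PySem.Str.strip t = ""
      · simp [hc]
      · simp only [hc, if_false]
        set clean_text := PySem.Str.strip t with hct
        set lines0 := (((PySem.Str.split? clean_text "\n").getD []).map PySem.Str.strip).filter (· != "") with hl0
        -- the two mode-detection pairs coincide
        have hpair :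
            (if lines0.length > 1 then
              (lines0.any pvIsParenA, lines0)
            else if PySem.Str.isIn "." clean_text && !PySem.Str.isIn "," clean_text
                    && decide (PySem.Str.len clean_text > 50) then
              (true, (((PySem.Str.split? (PySem.Str.replace clean_text ". " ".\n") "\n").getD []).map PySem.Str.strip).filter (· != ""))
            else
              (false, lines0))
            =
            (if lines0.length > 1 then
              (lines0.any (fun l => (pvInnerB l).isSome), lines0)
            else
              let m := PySem.Str.isIn "." clean_text && !PySem.Str.isIn "," clean_text
                         && decide (PySem.Str.len clean_text > 50)
              (m, if m then (((PySem.Str.split? (PySem.Str.replace clean_text ". " ".\n") "\n").getD []).map PySem.Str.strip).filter (· != "") else lines0)) := by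
          by_cases hlen : lines0.length > 1
          · simp only [hlen, if_true]
            rw [List.any_congr rfl (fun a => (pvInnerB_isSome a).symm)]
          · simp only [hlen, if_false]
            cases hm : PySem.Str.isIn "." clean_text && !PySem.Str.isIn "," clean_text
                         && decide (PySem.Str.len clean_text > 50) <;> simp
        rw [← hpair]
        set pr := (if lines0.length > 1 then
              (lines0.any pvIsParenA, lines0)
            else if PySem.Str.isIn "." clean_text && !PySem.Str.isIn "," clean_text
                    && decide (PySem.Str.len clean_text > 50) then
              (true, (((PySem.Str.split? (PySem.Str.replace clean_text ". " ".\n") "\n").getD []).map PySem.Str.strip).filter (· != ""))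
            else
              (false, lines0)) with hpr
        cases hb : pr.1 with
        | true =>
          simp only [Bool.not_true, if_true]
          exact (pvSentence_eq pr.2).symm
        | false =>
          simp only [Bool.not_false, if_true]
          rw [PySem.List.foldl_append_if
                (fun s => PySem.Str.strip s != "")
                (fun s => [("text", some (PySem.Str.strip s)), ("trans", (none : Option String))])]
          simp
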